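-- pv_equiv track=rewrite | github.com/lchancos1225-pixel/ai-juku | ai_school/app/services/listening_service.py | prev_full_unit
-- ===== SOURCE A (Python) =====
-- LISTENING_UNIT_ROWS = [
--     ('lis_g7_alphabet', 'アルファベット・音', 7),
--     ('lis_g7_greetings', 'あいさつ表現', 7),
--     ('lis_g7_numbers', '数字・曜日・月', 7),
--     ('lis_g7_be_verb', 'be 動詞文', 7),
--     ('lis_g7_general_verb', '一般動詞文', 7),
--     ('lis_g7_question', '疑問文と応答', 7),
--     ('lis_g8_past_tense', '過去形', 8),
--     ('lis_g8_auxiliary', '助動詞', 8),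
--     ('lis_g8_comparison', '比較表現', 8),
--     ('lis_g8_directions', '道案内', 8),
--     ('lis_g8_daily_life', '日常会話', 8),
--     ('lis_g9_present_perfect', '現在完了', 9),
--     ('lis_g9_passive', '受け身', 9),
--     ('lis_g9_infinitive', '不定詞・動名詞', 9),
--     ('lis_g9_relative', '関係代名詞入り短文', 9),
--     ('lis_g9_speech', '短いスピーチ・説明文', 9),
-- ]
--
-- def unit_index(full_unit_id: str):
--     for i, u in enumerate(LISTENING_UNIT_ROWS):
--         if u[0] == full_unit_id:
--             return i
--     return None
--
-- def prev_full_unit(full_unit_id: str):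
--     idx = unit_index(full_unit_id)
--     if idx is None or idx <= 0:
--         return None
--     g = LISTENING_UNIT_ROWS[idx][2]
--     for j in range(idx - 1, -1, -1):
--         if LISTENING_UNIT_ROWS[j][2] == g:
--             return LISTENING_UNIT_ROWS[j][0]
--     return None
-- ===== SOURCE B (Python) =====
-- # Static lookup table: for each unit id, the id of the previous unit of the
-- # same grade (first unit of each grade, and unknown ids, have no entry).
-- PREV_UNIT = {
--     'lis_g7_greetings': 'lis_g7_alphabet',
--     'lis_g7_numbers': 'lis_g7_greetings',
--     'lis_g7_be_verb': 'lis_g7_numbers',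
--     'lis_g7_general_verb': 'lis_g7_be_verb',
--     'lis_g7_question': 'lis_g7_general_verb',
--     'lis_g8_auxiliary': 'lis_g8_past_tense',
--     'lis_g8_comparison': 'lis_g8_auxiliary',
--     'lis_g8_directions': 'lis_g8_comparison',
--     'lis_g8_daily_life': 'lis_g8_directions',
--     'lis_g9_passive': 'lis_g9_present_perfect',
--     'lis_g9_infinitive': 'lis_g9_passive',
--     'lis_g9_relative': 'lis_g9_infinitive',
--     'lis_g9_speech': 'lis_g9_relative',
-- }
--
-- def prev_full_unit(full_unit_id: str):
--     return PREV_UNIT.get(full_unit_id)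
-- ===== Notes on version B (the rewrite author's own statement) =====
-- stated objective: simpler
-- what changed: Replaces the runtime linear index scan plus backward same-grade scan over LISTENING_UNIT_ROWS with a static precomputed prev-unit lookup table, so the function is a single dict lookup.
import Mathlib
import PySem

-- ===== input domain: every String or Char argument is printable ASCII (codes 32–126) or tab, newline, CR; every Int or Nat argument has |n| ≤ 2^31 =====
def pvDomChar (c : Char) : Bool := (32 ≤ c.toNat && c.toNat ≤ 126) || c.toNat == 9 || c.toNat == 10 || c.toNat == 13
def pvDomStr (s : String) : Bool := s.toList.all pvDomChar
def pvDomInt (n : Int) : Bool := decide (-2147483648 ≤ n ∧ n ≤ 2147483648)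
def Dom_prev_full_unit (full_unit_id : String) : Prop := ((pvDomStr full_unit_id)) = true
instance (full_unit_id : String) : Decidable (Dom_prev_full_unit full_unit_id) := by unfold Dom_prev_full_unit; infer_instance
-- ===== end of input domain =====

-- B replaces A's two runtime scans with a static precomputed prev-unit lookup table (simpler per-call logic).

-- ===== PORT A =====
-- module-level constant used by A
def LISTENING_UNIT_ROWS : List (String × String × Int) :=
  [ ("lis_g7_alphabet", "アルファベット・音", 7),
    ("lis_g7_greetings", "あいさつ表現", 7),
    ("lis_g7_numbers", "数字・曜日・月", 7),
    ("lis_g7_be_verb", "be 動詞文", 7),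
    ("lis_g7_general_verb", "一般動詞文", 7),
    ("lis_g7_question", "疑問文と応答", 7),
    ("lis_g8_past_tense", "過去形", 8),
    ("lis_g8_auxiliary", "助動詞", 8),
    ("lis_g8_comparison", "比較表現", 8),
    ("lis_g8_directions", "道案内", 8),
    ("lis_g8_daily_life", "日常会話", 8),
    ("lis_g9_present_perfect", "現在完了", 9),
    ("lis_g9_passive", "受け身", 9),
    ("lis_g9_infinitive", "不定詞・動名詞", 9),
    ("lis_g9_relative", "関係代名詞入り短文", 9),
    ("lis_g9_speech", "短いスピーチ・説明文", 9) ]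

-- for i, u in enumerate(...): if u[0] == full_unit_id: return i; return None
def unit_index_aux (s : String) : List (Int × (String × String × Int)) → Option Int
  | [] => none
  | (i, u) :: rest => if u.1 == s then some i else unit_index_aux s rest

def unit_index (full_unit_id : String) : Option Int :=
  unit_index_aux full_unit_id (PySem.List.enumerate LISTENING_UNIT_ROWS)

-- for j in range(idx-1, -1, -1): if rows[j][2] == g: return rows[j][0]; return None
def prev_scan (g : Int) : List Int → Option String
  | [] => none
  | j :: rest =>
    match PySem.List.pyGet? LISTENING_UNIT_ROWS j with
    | none => none   -- unreachable: j is a valid index (Python would raise IndexError)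
    | some u => if u.2.2 == g then some u.1 else prev_scan g rest

def prev_full_unit (full_unit_id : String) : Option String :=
  match unit_index full_unit_id with
  | none => none
  | some idx =>
    if idx ≤ 0 then none
    else
      match PySem.List.pyGet? LISTENING_UNIT_ROWS idx with
      | none => none  -- unreachable: idx is a valid index
      | some row => prev_scan row.2.2 (PySem.List.pyRange (idx - 1) (-1) (-1))

-- ===== PORT B =====
-- static lookup table: each unit id ↦ previous unit id of the same grade
def PREV_UNIT : PySem.Dict String String :=
  PySem.Dict.mk  -- keys are distinct, so the dict literal is this association list
    [ ("lis_g7_greetings", "lis_g7_alphabet"),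
      ("lis_g7_numbers", "lis_g7_greetings"),
      ("lis_g7_be_verb", "lis_g7_numbers"),
      ("lis_g7_general_verb", "lis_g7_be_verb"),
      ("lis_g7_question", "lis_g7_general_verb"),
      ("lis_g8_auxiliary", "lis_g8_past_tense"),
      ("lis_g8_comparison", "lis_g8_auxiliary"),
      ("lis_g8_directions", "lis_g8_comparison"),
      ("lis_g8_daily_life", "lis_g8_directions"),
      ("lis_g9_passive", "lis_g9_present_perfect"),
      ("lis_g9_infinitive", "lis_g9_passive"),
      ("lis_g9_relative", "lis_g9_infinitive"),
      ("lis_g9_speech", "lis_g9_relative") ]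

def prev_full_unit_alt (full_unit_id : String) : Option String :=
  PREV_UNIT.get? full_unit_id

-- ===== PRECONDITION & SPEC =====
def Spec_prev_full_unit (full_unit_id : String) (out : Option String) : Prop := out = prev_full_unit_alt full_unit_id
instance (full_unit_id : String) (out : Option String) : Decidable (Spec_prev_full_unit full_unit_id out) := by unfold Spec_prev_full_unit; infer_instance

-- ===== CLAIM (what is proved, stated in full; the proofs are below) =====
def Claim_equal_prev_full_unit : Prop := ∀ (full_unit_id : String), Dom_prev_full_unit full_unit_id → Spec_prev_full_unit full_unit_id (prev_full_unit full_unit_id)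

-- ===== LEMMAS AND PROOFS =====

-- ===== VERDICT (by name: the statement is the Claim_ definition above) =====
theorem prev_full_unit_spec : Claim_equal_prev_full_unit := by
  intro s _
  unfold Spec_prev_full_unit
  by_cases h0 : s = "lis_g7_alphabet"; · subst h0; decide
  by_cases h1 : s = "lis_g7_greetings"; · subst h1; decide
  by_cases h2 : s = "lis_g7_numbers"; · subst h2; decide
  by_cases h3 : s = "lis_g7_be_verb"; · subst h3; decide
  by_cases h4 : s = "lis_g7_general_verb"; · subst h4; decide
  by_cases h5 : s = "lis_g7_question"; · subst h5; decide
  by_cases h6 : s = "lis_g8_past_tense"; · subst h6; decide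
  by_cases h7 : s = "lis_g8_auxiliary"; · subst h7; decide
  by_cases h8 : s = "lis_g8_comparison"; · subst h8; decide
  by_cases h9 : s = "lis_g8_directions"; · subst h9; decide
  by_cases h10 : s = "lis_g8_daily_life"; · subst h10; decide
  by_cases h11 : s = "lis_g9_present_perfect"; · subst h11; decide
  by_cases h12 : s = "lis_g9_passive"; · subst h12; decide
  by_cases h13 : s = "lis_g9_infinitive"; · subst h13; decide
  by_cases h14 : s = "lis_g9_relative"; · subst h14; decide
  by_cases h15 : s = "lis_g9_speech"; · subst h15; decide
  simp [prev_full_unit, unit_index, LISTENING_UNIT_ROWS, unit_index_aux,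
    prev_full_unit_alt, PREV_UNIT, PySem.List.enumerate, PySem.Dict.get?_mk_cons, PySem.Dict.get?,
    Ne.symm h0, Ne.symm h1, Ne.symm h2, Ne.symm h3, Ne.symm h4, Ne.symm h5,
    Ne.symm h6, Ne.symm h7, Ne.symm h8, Ne.symm h9, Ne.symm h10, Ne.symm h11,
    Ne.symm h12, Ne.symm h13, Ne.symm h14, Ne.symm h15]
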